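-- pv_equiv track=rewrite | github.com/seoyoung059/algorithm | 백준/Gold/5904. Moo 게임/Moo 게임.py | mooLength
-- ===== SOURCE A (Python) =====
-- def mooLength(n):
--     l=0
--     k=0
--     while True:
--         if n<l*2+k+3:
--             break
--         l=2*l+k+3
--         k+=1
--     return k,l
-- ===== SOURCE B (Python) =====
-- def _seglen(k):
--     # closed form of the k-th segment length: l_k = 2^(k+2) - k - 4
--     return (1 << (k + 2)) - k - 4
--
-- def mooLength(n):
--     if n < 3:
--         return (0, 0)
--     k = n.bit_length() - 2
--     if _seglen(k) > n:
--         k -= 1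
--     elif _seglen(k + 1) <= n:
--         k += 1
--     return (k, _seglen(k))
-- ===== Notes on version B (the rewrite author's own statement) =====
-- stated objective: alternative
-- what changed: Replaced the doubling while-loop by the solved closed form of the segment-length recurrence: k is estimated from the bit length of n and corrected by at most one step, so no iteration remains.
import Mathlib
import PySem

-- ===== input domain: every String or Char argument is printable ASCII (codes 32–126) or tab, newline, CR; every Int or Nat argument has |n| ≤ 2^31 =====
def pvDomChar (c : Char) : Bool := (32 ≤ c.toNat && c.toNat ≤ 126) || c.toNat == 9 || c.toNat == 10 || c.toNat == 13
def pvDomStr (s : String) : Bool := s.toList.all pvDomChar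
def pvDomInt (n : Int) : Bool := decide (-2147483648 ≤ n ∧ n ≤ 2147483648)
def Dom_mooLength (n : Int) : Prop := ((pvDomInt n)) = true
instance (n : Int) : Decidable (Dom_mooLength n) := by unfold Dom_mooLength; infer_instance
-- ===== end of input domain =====

-- B replaces A's doubling loop by the solved recurrence l_k = 2^(k+2)-k-4 with a bit_length
-- estimate of k (constant number of arithmetic steps instead of a loop); return values only.

-- ===== PORT A =====
-- A's `while True` loop. l at least doubles every iteration, so on the stated domain
-- |n| ≤ 2^31 the loop breaks well within 64 iterations; the Nat fuel is only a totality
-- guard and its 0 branch is never reached on that domain.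
def mooLoop (fuel : Nat) (n l k : Int) : Int × Int :=
  match fuel with
  | 0 => (k, l)
  | fuel + 1 =>
    if n < l * 2 + k + 3 then (k, l)
    else mooLoop fuel n (2 * l + k + 3) (k + 1)

def mooLength (n : Int) : Int × Int := mooLoop 64 n 0 0

-- ===== PORT B =====
-- helper `_seglen` of Source B: (1 << (k+2)) - k - 4
def pvLB (k : Int) : Int := 2 ^ (k + 2).toNat - k - 4

-- for n ≥ 3, Python's n.bit_length() = Nat.log2 n + 1
def mooLength_alt (n : Int) : Int × Int :=
  if n < 3 then (0, 0)
  else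
    let k0 : Int := ((Nat.log2 n.toNat : Int) + 1) - 2
    let k : Int := if pvLB k0 > n then k0 - 1
                   else if pvLB (k0 + 1) ≤ n then k0 + 1
                   else k0
    (k, pvLB k)

-- ===== PRECONDITION & SPEC =====
def Spec_mooLength (n : Int) (out : Int × Int) : Prop := out = mooLength_alt n
instance (n : Int) (out : Int × Int) : Decidable (Spec_mooLength n out) := by unfold Spec_mooLength; infer_instance

-- ===== CLAIM (what is proved, stated in full; the proofs are below) =====
def Claim_equal_mooLength : Prop := ∀ (n : Int), Dom_mooLength n → Spec_mooLength n (mooLength n)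

-- ===== LEMMAS AND PROOFS =====

/-- Nat form of the segment length l_k = 2^(k+2) - (k+4). -/
def pvLBn (k : Nat) : Nat := 2 ^ (k + 2) - (k + 4)

lemma pv_pow_ge (k : Nat) : k + 4 ≤ 2 ^ (k + 2) := by
  induction k with
  | zero => norm_num
  | succ m ih =>
    have h : 2 ^ (m + 1 + 2) = 2 * 2 ^ (m + 2) := by ring
    omega

lemma pvLBn_cast (k : Nat) : (pvLBn k : Int) = 2 ^ (k + 2) - (k : Int) - 4 := by
  unfold pvLBn
  rw [Nat.cast_sub (pv_pow_ge k)]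
  push_cast
  ring

lemma pvLB_cast (k : Nat) : pvLB (k : Int) = (pvLBn k : Int) := by
  unfold pvLB
  have h : (((k : Int) + 2)).toNat = k + 2 := by omega
  rw [h, pvLBn_cast]

lemma pvLBn_succ (k : Nat) : pvLBn (k + 1) = 2 * pvLBn k + k + 3 := by
  unfold pvLBn
  have h1 := pv_pow_ge k
  have h2 : 2 ^ (k + 1 + 2) = 2 * 2 ^ (k + 2) := by ring
  omega

lemma pvLBn_mono : Monotone pvLBn := by
  apply monotone_nat_of_le_succ
  intro k
  have := pvLBn_succ k
  omega

lemma loop_char (d : Nat) : ∀ (j f : Nat) (n : Int), d < f →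
    (pvLBn (j + d) : Int) ≤ n → n < (pvLBn (j + d + 1) : Int) →
    mooLoop f n ((pvLBn j : Nat) : Int) ((j : Nat) : Int)
      = (((j + d : Nat) : Int), ((pvLBn (j + d) : Nat) : Int)) := by
  induction d with
  | zero =>
    intro j f n hf h1 h2
    obtain ⟨f', rfl⟩ : ∃ f', f = f' + 1 := ⟨f - 1, by omega⟩
    rw [mooLoop]
    have e : ((pvLBn (j + 1) : Nat) : Int) = (pvLBn j : Int) * 2 + j + 3 := by
      rw [pvLBn_succ]; push_cast; ring
    simp only [Nat.add_zero] at h2 ⊢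
    rw [if_pos (by rw [← e]; exact_mod_cast h2)]
  | succ d ih =>
    intro j f n hf h1 h2
    obtain ⟨f', rfl⟩ : ∃ f', f = f' + 1 := ⟨f - 1, by omega⟩
    rw [mooLoop]
    have hm : pvLBn (j + 1) ≤ pvLBn (j + d + 1) := pvLBn_mono (by omega)
    have e : ((pvLBn (j + 1) : Nat) : Int) = (pvLBn j : Int) * 2 + j + 3 := by
      rw [pvLBn_succ]; push_cast; ring
    have hc : ¬ n < (pvLBn j : Int) * 2 + j + 3 := by
      rw [← e]
      have h1'' : (pvLBn (j + d + 1) : Int) ≤ n := by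
        have : j + (d + 1) = j + d + 1 := by omega
        rw [this] at h1; exact h1
      have hcast : ((pvLBn (j + 1) : Nat) : Int) ≤ (pvLBn (j + d + 1) : Int) := by
        exact_mod_cast hm
      omega
    rw [if_neg hc]
    have e2 : 2 * ((pvLBn j : Nat) : Int) + ((j : Nat) : Int) + 3 = ((pvLBn (j + 1) : Nat) : Int) := by
      rw [pvLBn_succ]; push_cast; ring
    rw [e2, show ((j : Nat) : Int) + 1 = (((j + 1 : Nat) : Nat) : Int) by push_cast; ring]
    have h1' : (pvLBn (j + 1 + d) : Int) ≤ n := by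
      have : j + 1 + d = j + (d + 1) := by omega
      rw [this]; exact h1
    have h2' : n < (pvLBn (j + 1 + d + 1) : Int) := by
      have : j + 1 + d + 1 = j + (d + 1) + 1 := by omega
      rw [this]; exact h2
    have := ih (j + 1) f' n (by omega) h1' h2'
    rw [this]
    have : j + 1 + d = j + (d + 1) := by omega
    rw [this]

lemma A_char (k : Nat) (hk : k < 64) (n : Int) (h1 : (pvLBn k : Int) ≤ n)
    (h2 : n < (pvLBn (k + 1) : Int)) :
    mooLength n = (((k : Nat) : Int), ((pvLBn k : Nat) : Int)) := by
  have h0 : pvLBn 0 = 0 := by decide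
  have := loop_char k 0 64 n hk (by simpa using h1) (by simpa using h2)
  simpa [mooLength, h0] using this

lemma pv_pow3 (k : Nat) : k + 5 ≤ 3 * 2 ^ (k + 1) := by
  induction k with
  | zero => norm_num
  | succ m ih =>
    have h : 2 ^ (m + 2) = 2 * 2 ^ (m + 1) := by ring
    have := Nat.one_le_two_pow (n := m + 1)
    omega

lemma pvLBn_ge_pow (k : Nat) (hk : 1 ≤ k) : 2 ^ k ≤ pvLBn k := by
  obtain ⟨m, rfl⟩ := Nat.exists_eq_add_of_le hk
  unfold pvLBn
  have h1 := pv_pow3 m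
  have h2 : 2 ^ (1 + m + 2) = 4 * 2 ^ (m + 1) := by ring
  have h3 : 2 ^ (1 + m) = 2 ^ (m + 1) := by ring
  omega

lemma B_char (k : Nat) (hk : 1 ≤ k) (n : Int) (h3 : 3 ≤ n)
    (h1 : (pvLBn k : Int) ≤ n) (h2 : n < (pvLBn (k + 1) : Int)) :
    mooLength_alt n = (((k : Nat) : Int), ((pvLBn k : Nat) : Int)) := by
  have hn0 : n.toNat ≠ 0 := by omega
  -- upper bound on log2
  have hub : Nat.log2 n.toNat ≤ k + 2 := by
    have hlt : n.toNat < 2 ^ (k + 3) := by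
      have hle : pvLBn (k + 1) ≤ 2 ^ (k + 3) := by
        unfold pvLBn
        have : k + 1 + 2 = k + 3 := by omega
        rw [this]; exact Nat.sub_le _ _
      have hle' : (pvLBn (k + 1) : Int) ≤ ((2 ^ (k + 3) : Nat) : Int) := by exact_mod_cast hle
      omega
    have := (Nat.log2_lt hn0 (k := k + 3)).mpr hlt
    omega
  -- lower bound on log2
  have hlb : k ≤ Nat.log2 n.toNat := by
    have hge : 2 ^ k ≤ n.toNat := by
      have := pvLBn_ge_pow k hk
      have h' : ((2 ^ k : Nat) : Int) ≤ (pvLBn k : Int) := by exact_mod_cast this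
      omega
    exact (Nat.le_log2 hn0).mpr hge
  unfold mooLength_alt
  rw [if_neg (by omega)]
  have hmono : (pvLBn k : Int) < (pvLBn (k + 1) : Int) := by omega
  -- case on the value of the estimate
  have hcases : Nat.log2 n.toNat = k ∨ Nat.log2 n.toNat = k + 1 ∨ Nat.log2 n.toNat = k + 2 := by
    omega
  rcases hcases with hL | hL | hL
  · -- k0 = k - 1 ; first test false (pvLB (k-1) ≤ pvLBn k ≤ n), second true (pvLB k ≤ n)
    rw [hL]
    obtain ⟨m, rfl⟩ := Nat.exists_eq_add_of_le hk
    have e0 : ((1 + m : Nat) : Int) + 1 - 2 = (m : Int) := by push_cast; ring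
    rw [e0]
    have em : (pvLB (m : Int)) = (pvLBn m : Int) := pvLB_cast m
    have em1 : (pvLB ((m : Int) + 1)) = (pvLBn (m + 1) : Int) := by
      rw [show ((m : Int) + 1) = ((m + 1 : Nat) : Int) by push_cast; ring, pvLB_cast]
    have hmm : (pvLBn m : Int) ≤ (pvLBn (1 + m) : Int) := by
      exact_mod_cast pvLBn_mono (show m ≤ 1 + m by omega)
    have h1' : ¬ pvLB (m : Int) > n := by rw [em]; omega
    have heq : m + 1 = 1 + m := by omega
    have h2' : pvLB ((m : Int) + 1) ≤ n := by rw [em1, heq]; exact h1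
    simp only [h1', if_false, h2', if_true, if_neg, if_pos]
    rw [em1, heq]
    congr 1
    push_cast
    ring
  · -- k0 = k ; both tests false
    rw [hL]
    have e0 : ((k + 1 : Nat) : Int) + 1 - 2 = (k : Int) := by push_cast; ring
    rw [e0]
    have em : (pvLB (k : Int)) = (pvLBn k : Int) := pvLB_cast k
    have em1 : (pvLB ((k : Int) + 1)) = (pvLBn (k + 1) : Int) := by
      rw [show ((k : Int) + 1) = ((k + 1 : Nat) : Int) by push_cast; ring, pvLB_cast]
    have h1' : ¬ pvLB (k : Int) > n := by rw [em]; omega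
    have h2' : ¬ pvLB ((k : Int) + 1) ≤ n := by rw [em1]; omega
    simp only [h1', if_false, h2', if_true]
    rw [em]
  · -- k0 = k + 1 ; first test true (pvLB (k+1) > n)
    rw [hL]
    have e0 : ((k + 2 : Nat) : Int) + 1 - 2 = (k : Int) + 1 := by push_cast; ring
    rw [e0]
    have em1 : (pvLB ((k : Int) + 1)) = (pvLBn (k + 1) : Int) := by
      rw [show ((k : Int) + 1) = ((k + 1 : Nat) : Int) by push_cast; ring, pvLB_cast]
    have h1' : pvLB ((k : Int) + 1) > n := by rw [em1]; omega
    simp only [h1', if_true]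
    have em : (pvLB ((k : Int) + 1 - 1)) = (pvLBn k : Int) := by
      rw [show ((k : Int) + 1 - 1) = ((k : Nat) : Int) by push_cast; ring, pvLB_cast]
    rw [em]
    congr 1
    ring

lemma exists_k : ∀ (m : Nat) (n : Int), 3 ≤ n → n < (pvLBn m : Int) →
    ∃ k, 1 ≤ k ∧ k < m ∧ (pvLBn k : Int) ≤ n ∧ n < (pvLBn (k + 1) : Int) := by
  intro m
  induction m with
  | zero => intro n h3 h; simp [pvLBn] at h; omega
  | succ m ih =>
    intro n h3 h
    by_cases hm : n < (pvLBn m : Int)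
    · obtain ⟨k, a, b, c, d⟩ := ih n h3 hm
      exact ⟨k, a, by omega, c, d⟩
    · push_neg at hm
      have hm1 : 1 ≤ m := by
        by_contra hc
        interval_cases m <;> simp_all [pvLBn] <;> omega
      exact ⟨m, hm1, by omega, hm, h⟩

-- ===== VERDICT (by name: the statement is the Claim_ definition above) =====
theorem mooLength_spec : Claim_equal_mooLength := by
  intro n hdom
  unfold Spec_mooLength
  unfold Dom_mooLength pvDomInt at hdom
  rw [decide_eq_true_iff] at hdom
  by_cases h3 : n < 3
  · have hA : mooLength n = (0, 0) := by
      rw [mooLength, mooLoop]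
      rw [if_pos (by omega)]
    have hB : mooLength_alt n = (0, 0) := by
      rw [mooLength_alt, if_pos h3]
    rw [hA, hB]
  · push_neg at h3
    have hbound : n < (pvLBn 31 : Int) := by
      have : (pvLBn 31 : Int) = 8589934557 := by norm_num [pvLBn]
      omega
    obtain ⟨k, hk1, hk31, hk2, hk3⟩ := exists_k 31 n h3 hbound
    rw [A_char k (by omega) n hk2 hk3, B_char k hk1 n h3 hk2 hk3]
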